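-- pv_equiv track=rewrite | github.com/rachellhea/advent2021 | day2.py | traverse_xy
-- ===== SOURCE A (Python) =====
-- def traverse_xy(inputs):
--     x, y = 0, 0
--     for (c, v) in inputs:
--         if c == 'forward':
--             x += v
--         elif c == 'down':
--             y += v
--         elif c == 'up':
--             y -= v
--     return (x, y)
-- ===== SOURCE B (Python) =====
-- def traverse_xy(inputs):
--     data = list(inputs)
--     x = sum(v for c, v in data if c == 'forward')
--     y = sum(v for c, v in data if c == 'down') - sum(v for c, v in data if c == 'up')
--     return (x, y)
-- ===== Notes on version B (the rewrite author's own statement) =====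
-- stated objective: alternative
-- what changed: Replaces the single branched accumulation loop by three independent filtered sums computed component-wise (inputs materialized once).
import Mathlib
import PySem

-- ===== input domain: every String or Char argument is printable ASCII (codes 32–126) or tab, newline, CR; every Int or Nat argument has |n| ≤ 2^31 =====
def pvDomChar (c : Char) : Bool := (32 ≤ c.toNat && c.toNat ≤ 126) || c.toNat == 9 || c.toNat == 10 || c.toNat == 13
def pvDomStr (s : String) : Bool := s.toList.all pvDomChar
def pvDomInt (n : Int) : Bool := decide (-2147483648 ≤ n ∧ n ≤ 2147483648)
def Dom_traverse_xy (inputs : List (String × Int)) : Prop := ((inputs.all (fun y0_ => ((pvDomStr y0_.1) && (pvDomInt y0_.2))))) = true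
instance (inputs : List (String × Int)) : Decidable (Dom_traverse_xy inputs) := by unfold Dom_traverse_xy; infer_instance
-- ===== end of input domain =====

-- B replaces the single branched loop by three independent filtered sums (alternative decomposition, same cost).


-- ===== PORT A =====
def traverse_xy (inputs : List (String × Int)) : Int × Int :=
  inputs.foldl (fun (acc : Int × Int) p =>
    if p.1 == "forward" then (acc.1 + p.2, acc.2)
    else if p.1 == "down" then (acc.1, acc.2 + p.2)
    else if p.1 == "up" then (acc.1, acc.2 - p.2)
    else acc) (0, 0)

-- ===== PORT B =====
-- three independent filtered sums, component-wise
def traverse_xy_alt (inputs : List (String × Int)) : Int × Int :=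
  ((((inputs.filter (fun p => p.1 == "forward")).map Prod.snd).sum),
   (((inputs.filter (fun p => p.1 == "down")).map Prod.snd).sum)
     - (((inputs.filter (fun p => p.1 == "up")).map Prod.snd).sum))

-- ===== PRECONDITION & SPEC =====
def Spec_traverse_xy (inputs : List (String × Int)) (out : Int × Int) : Prop := out = traverse_xy_alt inputs
instance (inputs : List (String × Int)) (out : Int × Int) : Decidable (Spec_traverse_xy inputs out) := by unfold Spec_traverse_xy; infer_instance

-- ===== CLAIM (what is proved, stated in full; the proofs are below) =====
def Claim_equal_traverse_xy : Prop := ∀ (inputs : List (String × Int)), Dom_traverse_xy inputs → Spec_traverse_xy inputs (traverse_xy inputs)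

-- ===== LEMMAS AND PROOFS =====

-- ===== VERDICT (by name: the statement is the Claim_ definition above) =====
lemma traverse_xy_loop (inputs : List (String × Int)) (a : Int × Int) :
    inputs.foldl (fun (acc : Int × Int) p =>
      if p.1 == "forward" then (acc.1 + p.2, acc.2)
      else if p.1 == "down" then (acc.1, acc.2 + p.2)
      else if p.1 == "up" then (acc.1, acc.2 - p.2)
      else acc) a
    = (a.1 + (((inputs.filter (fun p => p.1 == "forward")).map Prod.snd).sum),
       a.2 + (((inputs.filter (fun p => p.1 == "down")).map Prod.snd).sum)
           - (((inputs.filter (fun p => p.1 == "up")).map Prod.snd).sum)) := by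
  induction inputs generalizing a with
  | nil => simp
  | cons h t ih =>
    simp only [List.foldl_cons, List.filter_cons]
    by_cases h1 : h.1 == "forward" <;> by_cases h2 : h.1 == "down" <;> by_cases h3 : h.1 == "up" <;>
      rw [ih] <;> simp_all <;> omega

theorem traverse_xy_spec : Claim_equal_traverse_xy := by
  intro inputs _
  unfold Spec_traverse_xy traverse_xy traverse_xy_alt
  rw [traverse_xy_loop]
  simp
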